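-- pv_equiv track=rewrite | github.com/aidenisaman/pyRacerzRevamped | modules/ai_track_model.py | _smart_seed_from_checkpoint
-- ===== SOURCE A (Python) =====
-- def _smart_seed_from_checkpoint(start_tiles, base_mask, grid_w, grid_h, end_center_tile=None):
--   if not start_tiles:
--     return None
--
--   xs = [t[0] for t in start_tiles]
--   ys = [t[1] for t in start_tiles]
--   cx = int(sum(xs) / float(len(xs)))
--   cy = int(sum(ys) / float(len(ys)))
--   cp_w = max(xs) - min(xs) + 1
--   cp_h = max(ys) - min(ys) + 1
--
--   seed = None
--
--   # If next checkpoint direction is known, prefer that side over local pixel counts.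
--   if end_center_tile is not None:
--     ex, ey = end_center_tile
--     dir_x = ex - cx
--     dir_y = ey - cy
--
--     if cp_h > cp_w:
--       # Vertical checkpoint: seed left/right based on end checkpoint direction.
--       offset = 5 if dir_x > 0 else -5
--       seed = (cx + offset, cy)
--     else:
--       # Horizontal checkpoint: seed above/below based on end checkpoint direction.
--       offset = 5 if dir_y > 0 else -5
--       seed = (cx, cy + offset)
--   else:
--     # Fallback: choose side with more nearby road tiles.
--     if cp_h > cp_w:
--       left_cnt = 0
--       right_cnt = 0
--       for yy in range(max(0, cy - 3), min(grid_h, cy + 4)):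
--         for xx in range(max(0, cx - 10), max(0, cx - 1)):
--           if (xx, yy) in base_mask:
--             left_cnt += 1
--         for xx in range(min(grid_w, cx + 1), min(grid_w, cx + 11)):
--           if (xx, yy) in base_mask:
--             right_cnt += 1
--       seed = (cx - 4, cy) if left_cnt > right_cnt else (cx + 4, cy)
--     else:
--       up_cnt = 0
--       down_cnt = 0
--       for xx in range(max(0, cx - 3), min(grid_w, cx + 4)):
--         for yy in range(max(0, cy - 10), max(0, cy - 1)):
--           if (xx, yy) in base_mask:
--             up_cnt += 1
--         for yy in range(min(grid_h, cy + 1), min(grid_h, cy + 11)):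
--           if (xx, yy) in base_mask:
--             down_cnt += 1
--       seed = (cx, cy - 4) if up_cnt > down_cnt else (cx, cy + 4)
--
--   # Snap to nearest valid road tile around estimated seed.
--   sx, sy = seed
--   if (sx, sy) in base_mask:
--     return (sx, sy)
--   for r in range(1, 12):
--     for dy in range(-r, r + 1):
--       for dx in range(-r, r + 1):
--         nx = sx + dx
--         ny = sy + dy
--         if nx < 0 or ny < 0 or nx >= grid_w or ny >= grid_h:
--           continue
--         if (nx, ny) in base_mask:
--           return (nx, ny)
--   return (cx, cy)
-- ===== SOURCE B (Python) =====
-- def _smart_seed_from_checkpoint(start_tiles, base_mask, grid_w, grid_h, end_center_tile=None):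
--   if not start_tiles:
--     return None
--
--   xs = [t[0] for t in start_tiles]
--   ys = [t[1] for t in start_tiles]
--   cx = int(sum(xs) / float(len(xs)))
--   cy = int(sum(ys) / float(len(ys)))
--   cp_w = max(xs) - min(xs) + 1
--   cp_h = max(ys) - min(ys) + 1
--
--   if end_center_tile is not None:
--     ex, ey = end_center_tile
--     if cp_h > cp_w:
--       sx, sy = cx + (5 if ex - cx > 0 else -5), cy
--     else:
--       sx, sy = cx, cy + (5 if ey - cy > 0 else -5)
--   else:
--     if cp_h > cp_w:
--       left_cnt = 0
--       right_cnt = 0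
--       for yy in range(max(0, cy - 3), min(grid_h, cy + 4)):
--         for xx in range(max(0, cx - 10), max(0, cx - 1)):
--           if (xx, yy) in base_mask:
--             left_cnt += 1
--         for xx in range(min(grid_w, cx + 1), min(grid_w, cx + 11)):
--           if (xx, yy) in base_mask:
--             right_cnt += 1
--       sx, sy = ((cx - 4) if left_cnt > right_cnt else (cx + 4)), cy
--     else:
--       up_cnt = 0
--       down_cnt = 0
--       for xx in range(max(0, cx - 3), min(grid_w, cx + 4)):
--         for yy in range(max(0, cy - 10), max(0, cy - 1)):
--           if (xx, yy) in base_mask: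
--             up_cnt += 1
--         for yy in range(min(grid_h, cy + 1), min(grid_h, cy + 11)):
--           if (xx, yy) in base_mask:
--             down_cnt += 1
--       sx, sy = cx, ((cy - 4) if up_cnt > down_cnt else (cy + 4))
--
--   # Snap: gather all in-grid road offsets within Chebyshev radius 11, pick min distance
--   # (first in (dy, dx) row-major order on ties).
--   if (sx, sy) in base_mask:
--     return (sx, sy)
--   cands = [(dx, dy)
--            for dy in range(-11, 12)
--            for dx in range(-11, 12)
--            if 0 <= sx + dx < grid_w and 0 <= sy + dy < grid_h
--            and (sx + dx, sy + dy) in base_mask]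
--   if not cands:
--     return (cx, cy)
--   dx, dy = min(cands, key=lambda c: max(abs(c[0]), abs(c[1])))
--   return (sx + dx, sy + dy)
-- ===== Notes on version B (the rewrite author's own statement) =====
-- stated objective: alternative
-- what changed: The snap-to-road search is re-decomposed: instead of A's early-return scan over expanding squares r = 1..11 (rescanning inner tiles each round), B gathers every in-grid road offset in the 23x23 window in one (dy, dx) row-major pass and selects the Chebyshev-minimal one with min(), whose first-minimum rule reproduces A's tie-break; the centroid/seed-direction prefix is kept identical.
import Mathlib
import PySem

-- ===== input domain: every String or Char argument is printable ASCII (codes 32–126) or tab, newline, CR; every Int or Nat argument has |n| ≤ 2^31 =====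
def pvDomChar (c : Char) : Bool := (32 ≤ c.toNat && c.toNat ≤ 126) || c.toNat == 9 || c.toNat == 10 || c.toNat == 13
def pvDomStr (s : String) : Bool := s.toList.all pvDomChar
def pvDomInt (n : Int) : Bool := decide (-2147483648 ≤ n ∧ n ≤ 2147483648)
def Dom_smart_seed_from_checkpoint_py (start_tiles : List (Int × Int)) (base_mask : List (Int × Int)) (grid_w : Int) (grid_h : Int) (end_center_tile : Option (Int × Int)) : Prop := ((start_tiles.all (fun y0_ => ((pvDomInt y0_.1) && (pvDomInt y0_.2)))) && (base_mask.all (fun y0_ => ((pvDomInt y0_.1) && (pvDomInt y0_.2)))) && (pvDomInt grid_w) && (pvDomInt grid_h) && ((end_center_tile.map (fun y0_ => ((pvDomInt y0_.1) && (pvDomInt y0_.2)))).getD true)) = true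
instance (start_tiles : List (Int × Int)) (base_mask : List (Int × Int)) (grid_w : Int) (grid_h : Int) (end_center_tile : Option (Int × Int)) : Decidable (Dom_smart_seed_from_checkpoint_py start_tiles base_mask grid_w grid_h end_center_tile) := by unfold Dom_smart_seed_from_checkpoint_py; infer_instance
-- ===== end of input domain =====

-- B replaces A's early-return expanding-square snap scan with one gather-then-select pass
-- (collect all valid offsets in the radius-11 window, pick the Chebyshev-minimal one with min());
-- objective: alternative decomposition, not speed. Centroid/seed code is identical in A and B
-- (pvPrefix transliterates that shared text once).

-- Shared centroid/bounding-box/seed-direction prefix, identical text in Source A and Source B.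
-- Returns (cx, cy, sx, sy). Callers handle the empty start_tiles case, so the lists are
-- nonempty and the `.getD 0` defaults of max?/min? are never taken.
-- int(sum(xs)/float(len(xs))) is ported as exact truncating division (PySem.Int.truncdiv),
-- exact while |sum| < 2^53.
def pvPrefix (start_tiles : List (Int × Int)) (base_mask : List (Int × Int)) (grid_w : Int)
    (grid_h : Int) (end_center_tile : Option (Int × Int)) : Int × Int × Int × Int :=
  let xs := start_tiles.map (fun t => t.1)
  let ys := start_tiles.map (fun t => t.2)
  let cx := PySem.Int.truncdiv xs.sum (xs.length : Int)
  let cy := PySem.Int.truncdiv ys.sum (ys.length : Int)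
  let cp_w := (PySem.List.max? xs (fun x => x)).getD 0 - (PySem.List.min? xs (fun x => x)).getD 0 + 1
  let cp_h := (PySem.List.max? ys (fun x => x)).getD 0 - (PySem.List.min? ys (fun x => x)).getD 0 + 1
  match end_center_tile with
  | some (ex, ey) =>
    if cp_h > cp_w then
      let offset : Int := if ex - cx > 0 then 5 else -5
      (cx, cy, cx + offset, cy)
    else
      let offset : Int := if ey - cy > 0 then 5 else -5
      (cx, cy, cx, cy + offset)
  | none =>
    if cp_h > cp_w then
      let lr := (PySem.List.pyRange (max 0 (cy - 3)) (min grid_h (cy + 4)) 1).foldl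
        (fun (ac : Int × Int) yy =>
          let l := (PySem.List.pyRange (max 0 (cx - 10)) (max 0 (cx - 1)) 1).foldl
            (fun a xx => if base_mask.contains (xx, yy) then a + 1 else a) ac.1
          let r := (PySem.List.pyRange (min grid_w (cx + 1)) (min grid_w (cx + 11)) 1).foldl
            (fun a xx => if base_mask.contains (xx, yy) then a + 1 else a) ac.2
          (l, r)) (0, 0)
      (cx, cy, (if lr.1 > lr.2 then cx - 4 else cx + 4), cy)
    else
      let ud := (PySem.List.pyRange (max 0 (cx - 3)) (min grid_w (cx + 4)) 1).foldl
        (fun (ac : Int × Int) xx =>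
          let u := (PySem.List.pyRange (max 0 (cy - 10)) (max 0 (cy - 1)) 1).foldl
            (fun a yy => if base_mask.contains (xx, yy) then a + 1 else a) ac.1
          let d := (PySem.List.pyRange (min grid_h (cy + 1)) (min grid_h (cy + 11)) 1).foldl
            (fun a yy => if base_mask.contains (xx, yy) then a + 1 else a) ac.2
          (u, d)) (0, 0)
      (cx, cy, cx, (if ud.1 > ud.2 then cy - 4 else cy + 4))

-- ===== PORT A =====
-- A's snap: expanding squares r = 1..11, scanning dy, dx ∈ [-r, r] row-major, first hit wins.
def pvSnapA (base_mask : List (Int × Int)) (grid_w : Int) (grid_h : Int) (sx : Int) (sy : Int) :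
    Option (Int × Int) :=
  ((PySem.List.pyRange 1 12 1).flatMap (fun r =>
    (PySem.List.pyRange (-r) (r + 1) 1).flatMap (fun dy =>
      (PySem.List.pyRange (-r) (r + 1) 1).map (fun dx => (sx + dx, sy + dy))))).find?
    (fun n => !(decide (n.1 < 0) || decide (n.2 < 0) || decide (grid_w ≤ n.1) || decide (grid_h ≤ n.2))
      && base_mask.contains n)

def smart_seed_from_checkpoint_py (start_tiles : List (Int × Int)) (base_mask : List (Int × Int)) (grid_w : Int) (grid_h : Int) (end_center_tile : Option (Int × Int)) : Option (Int × Int) :=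
  if start_tiles = [] then none
  else
    let p := pvPrefix start_tiles base_mask grid_w grid_h end_center_tile
    if base_mask.contains (p.2.2.1, p.2.2.2) then some (p.2.2.1, p.2.2.2)
    else
      match pvSnapA base_mask grid_w grid_h p.2.2.1 p.2.2.2 with
      | some n => some n
      | none => some (p.1, p.2.1)

-- ===== PORT B =====
-- B's key: Chebyshev distance of an offset, max(abs(dx), abs(dy)).
def pvCheb (c : Int × Int) : Int := max |c.1| |c.2|

-- B's snap: gather every in-grid road offset in the radius-11 window (dy outer, dx inner),
-- then min() by Chebyshev distance (first in iteration order wins ties); none = no candidate.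
def pvSnapB (base_mask : List (Int × Int)) (grid_w : Int) (grid_h : Int) (sx : Int) (sy : Int) :
    Option (Int × Int) :=
  let cands := (PySem.List.pyRange (-11) 12 1).flatMap (fun dy =>
    (PySem.List.pyRange (-11) 12 1).filterMap (fun dx =>
      if decide (0 ≤ sx + dx) && decide (sx + dx < grid_w) && decide (0 ≤ sy + dy)
          && decide (sy + dy < grid_h) && base_mask.contains (sx + dx, sy + dy)
      then some (dx, dy) else none))
  match PySem.List.min? cands pvCheb with
  | some c => some (sx + c.1, sy + c.2)
  | none => none

def smart_seed_from_checkpoint_py_alt (start_tiles : List (Int × Int)) (base_mask : List (Int × Int)) (grid_w : Int) (grid_h : Int) (end_center_tile : Option (Int × Int)) : Option (Int × Int) :=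
  if start_tiles = [] then none
  else
    let p := pvPrefix start_tiles base_mask grid_w grid_h end_center_tile
    if base_mask.contains (p.2.2.1, p.2.2.2) then some (p.2.2.1, p.2.2.2)
    else
      match pvSnapB base_mask grid_w grid_h p.2.2.1 p.2.2.2 with
      | some n => some n
      | none => some (p.1, p.2.1)

-- ===== PRECONDITION & SPEC =====
def Spec_smart_seed_from_checkpoint_py (start_tiles : List (Int × Int)) (base_mask : List (Int × Int)) (grid_w : Int) (grid_h : Int) (end_center_tile : Option (Int × Int)) (out : Option (Int × Int)) : Prop := out = smart_seed_from_checkpoint_py_alt start_tiles base_mask grid_w grid_h end_center_tile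
instance (start_tiles : List (Int × Int)) (base_mask : List (Int × Int)) (grid_w : Int) (grid_h : Int) (end_center_tile : Option (Int × Int)) (out : Option (Int × Int)) : Decidable (Spec_smart_seed_from_checkpoint_py start_tiles base_mask grid_w grid_h end_center_tile out) := by unfold Spec_smart_seed_from_checkpoint_py; infer_instance

-- ===== CLAIM (what is proved, stated in full; the proofs are below) =====
def Claim_equal_smart_seed_from_checkpoint_py : Prop := ∀ (start_tiles : List (Int × Int)) (base_mask : List (Int × Int)) (grid_w : Int) (grid_h : Int) (end_center_tile : Option (Int × Int)), Dom_smart_seed_from_checkpoint_py start_tiles base_mask grid_w grid_h end_center_tile → Spec_smart_seed_from_checkpoint_py start_tiles base_mask grid_w grid_h end_center_tile (smart_seed_from_checkpoint_py start_tiles base_mask grid_w grid_h end_center_tile)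

-- ===== LEMMAS AND PROOFS =====

-- Squares and rings of offsets, and their layer-by-layer concatenations.
def pvSq (r : Int) : List (Int × Int) :=
  (PySem.List.pyRange (-r) (r + 1) 1).flatMap (fun dy =>
    (PySem.List.pyRange (-r) (r + 1) 1).map (fun dx => (dx, dy)))
def pvRing (r : Int) : List (Int × Int) := (pvSq r).filter (fun c => pvCheb c == r)
def pvCatSq : Int → Nat → List (Int × Int)
  | _, 0 => []
  | k, n + 1 => pvSq k ++ pvCatSq (k + 1) n
def pvCatRing : Int → Nat → List (Int × Int)
  | _, 0 => []
  | k, n + 1 => pvRing k ++ pvCatRing (k + 1) n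
def pvLayered (l : List (Int × Int)) : Int → Nat → List (Int × Int)
  | _, 0 => []
  | k, n + 1 => l.filter (fun c => pvCheb c == k) ++ pvLayered l (k + 1) n
def pvWindow : List (Int × Int) :=
  (PySem.List.pyRange (-11) 12 1).flatMap (fun dy =>
    (PySem.List.pyRange (-11) 12 1).map (fun dx => (dx, dy)))

theorem pv_mem_sq (r : Int) (c : Int × Int) :
    c ∈ pvSq r ↔ (-r ≤ c.1 ∧ c.1 ≤ r ∧ -r ≤ c.2 ∧ c.2 ≤ r) := by
  obtain ⟨a, b⟩ := c
  simp only [pvSq, List.mem_flatMap, List.mem_map, PySem.List.mem_pyRange_one, Prod.mk.injEq]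
  constructor
  · rintro ⟨dy, ⟨h1, h2⟩, dx, ⟨h3, h4⟩, h5, h6⟩
    subst h5; subst h6
    refine ⟨h3, by omega, h1, by omega⟩
  · rintro ⟨h1, h2, h3, h4⟩
    exact ⟨b, ⟨h3, by omega⟩, a, ⟨h1, by omega⟩, rfl, rfl⟩

theorem pv_cheb_le_iff (c : Int × Int) (r : Int) : pvCheb c ≤ r ↔ |c.1| ≤ r ∧ |c.2| ≤ r := by
  simp [pvCheb]

theorem pv_mem_sq_cheb (r : Int) (c : Int × Int) : c ∈ pvSq r → pvCheb c ≤ r := by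
  intro h
  rw [pv_mem_sq] at h
  rw [pv_cheb_le_iff, abs_le, abs_le]
  omega

theorem pv_cheb_mem_sq (r : Int) (c : Int × Int) (h : pvCheb c ≤ r) : c ∈ pvSq r := by
  rw [pv_cheb_le_iff, abs_le, abs_le] at h
  rw [pv_mem_sq]; omega

-- find? skips elements known to fail the predicate: restricting to a filter that keeps
-- every possibly-satisfying element does not change the result.
theorem pv_find?_stop {α : Type} (q r : α → Bool) (l : List α)
    (h : ∀ x ∈ l, r x = false → q x = false) : l.find? q = (l.filter r).find? q := by
  induction l with
  | nil => rfl
  | cons a t ih =>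
    by_cases hr : r a
    · by_cases hq : q a
      · simp [hr, hq]
      · simp only [Bool.not_eq_true] at hq
        simp [hr, hq,
          ih (fun x hx => h x (List.mem_cons_of_mem a hx))]
    · simp only [Bool.not_eq_true] at hr
      have hq : q a = false := h a (List.mem_cons_self) hr
      simp [hr, hq,
        ih (fun x hx => h x (List.mem_cons_of_mem a hx))]

theorem pv_lemA (n : Nat) (k : Int) (q : Int × Int → Bool)
    (hq : ∀ c : Int × Int, pvCheb c < k → q c = false) :
    (pvCatSq k n).find? q = (pvCatRing k n).find? q := by
  induction n generalizing k with
  | zero => rfl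
  | succ n ih =>
    have hsq : (pvSq k).find? q = (pvRing k).find? q := by
      apply pv_find?_stop
      intro x hx hrx
      apply hq
      have hle := pv_mem_sq_cheb k x hx
      have : ¬ (pvCheb x == k) = true := by simp [hrx]
      simp only [beq_iff_eq] at this
      omega
    rw [pvCatSq, pvCatRing, List.find?_append, List.find?_append, hsq]
    cases hfr : (pvRing k).find? q with
    | some m => simp
    | none =>
      simp only [Option.none_or]
      apply ih (k + 1)
      intro c hc
      by_cases hck : pvCheb c < k
      · exact hq c hck
      · have hceq : pvCheb c = k := by omega
        have hmem : c ∈ pvRing k := by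
          rw [pvRing, List.mem_filter]
          exact ⟨pv_cheb_mem_sq k c (le_of_eq hceq), by simp [hceq]⟩
        have := List.find?_eq_none.mp hfr c hmem
        simpa using this

-- min?'s fold with a some-accumulator, in terms of min? of the tail.
def pvMinStep {α : Type} (key : α → Int) : Option α → α → Option α :=
  fun acc x =>
    match acc with
    | none => some x
    | some m => if key x < key m then some x else some m

theorem pv_min?_eq_foldl {α : Type} (key : α → Int) (l : List α) :
    PySem.List.min? l key = l.foldl (pvMinStep key) none := rfl

def pvMerge {α : Type} (key : α → Int) (o : Option α) (a : α) : Option α :=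
  match o with
  | none => some a
  | some m => if key m < key a then some m else some a

theorem pv_foldl_minStep_some {α : Type} (key : α → Int) (t : List α) (a : α) :
    t.foldl (pvMinStep key) (some a) = pvMerge key (t.foldl (pvMinStep key) none) a := by
  induction t generalizing a with
  | nil => rfl
  | cons x t ih =>
    show t.foldl (pvMinStep key) (pvMinStep key (some a) x)
      = pvMerge key (t.foldl (pvMinStep key) (pvMinStep key none x)) a
    have hstep : pvMinStep key (some a) x = some (if key x < key a then x else a) := by
      simp only [pvMinStep]
      split_ifs <;> rfl
    have hstep0 : pvMinStep key none x = some x := rfl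
    rw [hstep, hstep0, ih, ih x]
    cases h0 : t.foldl (pvMinStep key) none with
    | none => simp only [pvMerge]; split_ifs <;> simp_all
    | some m => simp only [pvMerge]; split_ifs <;> simp_all <;> omega

-- If k is a lower bound of the keys and some element attains it, min? returns the first
-- element attaining k.
theorem pv_min?_attains {α : Type} (key : α → Int) (l : List α) (k : Int) (m : α)
    (hlb : ∀ x ∈ l, k ≤ key x) (hf : l.find? (fun x => key x == k) = some m) :
    PySem.List.min? l key = some m := by
  induction l with
  | nil => simp at hf
  | cons x t ih =>
    have hkm : key m = k := by
      have := List.find?_some hf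
      simpa using this
    by_cases hx : (key x == k) = true
    · rw [List.find?_cons_of_pos (p := fun x => key x == k) hx] at hf
      injection hf with hf
      subst hf
      simp only [beq_iff_eq] at hx
      rw [pv_min?_eq_foldl, List.foldl_cons]
      show t.foldl (pvMinStep key) (some x) = some x
      rw [pv_foldl_minStep_some]
      cases hm : t.foldl (pvMinStep key) none with
      | none => rfl
      | some m' =>
        have hmem : m' ∈ t := PySem.List.min?_mem (by rw [pv_min?_eq_foldl]; exact hm)
        have : k ≤ key m' := hlb m' (List.mem_cons_of_mem x hmem)
        show pvMerge key (some m') x = some x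
        simp only [pvMerge]
        rw [if_neg (by omega)]
    · rw [List.find?_cons_of_neg (p := fun x => key x == k) hx] at hf
      have hmt := ih (fun y hy => hlb y (List.mem_cons_of_mem x hy)) hf
      simp only [beq_iff_eq] at hx
      have hkx : k < key x := lt_of_le_of_ne (hlb x List.mem_cons_self) (fun h => hx h.symm)
      rw [pv_min?_eq_foldl, List.foldl_cons]
      show t.foldl (pvMinStep key) (some x) = some m
      rw [pv_min?_eq_foldl] at hmt
      rw [pv_foldl_minStep_some, hmt]
      show (if key m < key x then some m else some x) = some m
      rw [if_pos (by omega)]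

theorem pv_filter_absorb {α : Type} (l : List α) (q r : α → Bool)
    (h : ∀ x ∈ l, q x = true → r x = true) : l.filter q = (l.filter r).filter q := by
  rw [List.filter_comm]
  exact (List.filter_eq_self.mpr (fun x hx =>
    h x (List.mem_of_mem_filter hx) (List.of_mem_filter hx))).symm

theorem pv_layered_filter (n : Nat) (k : Int) (l : List (Int × Int)) (p : Int × Int → Bool)
    (h : ∀ x ∈ l, k ≤ pvCheb x → p x = true) :
    pvLayered (l.filter p) k n = pvLayered l k n := by
  induction n generalizing k with
  | zero => rfl
  | succ n ih =>
    rw [pvLayered, pvLayered]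
    congr 1
    · rw [List.filter_comm]
      exact List.filter_eq_self.mpr (fun x hx => by
        obtain ⟨hm, hk⟩ := List.mem_filter.mp hx
        simp only [beq_iff_eq] at hk
        exact h x hm (le_of_eq hk.symm))
    · exact ih (k + 1) (fun x hx hk => h x hx (by omega))

theorem pv_lemB (n : Nat) (k : Int) (l : List (Int × Int)) (q : Int × Int → Bool)
    (hb : ∀ x ∈ l, k ≤ pvCheb x ∧ pvCheb x < k + n) :
    PySem.List.min? (l.filter q) pvCheb = (pvLayered l k n).find? q := by
  induction n generalizing k l with
  | zero =>
    have hl : l = [] := by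
      cases l with
      | nil => rfl
      | cons x t => exact absurd (hb x List.mem_cons_self) (by simp)
    subst hl; rfl
  | succ n ih =>
    rw [pvLayered, List.find?_append]
    cases h0 : (l.filter (fun c => pvCheb c == k)).find? q with
    | some m =>
      simp only [Option.some_or]
      apply pv_min?_attains pvCheb (l.filter q) k m
      · intro x hx; exact (hb x (List.mem_of_mem_filter hx)).1
      · rw [List.find?_filter] at h0 ⊢
        rw [← h0]
        congr 1
        funext x
        exact decide_eq_decide.mpr and_comm
    | none =>
      simp only [Option.none_or]
      have hq0 : ∀ x ∈ l, pvCheb x = k → q x = false := by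
        intro x hx hc
        have hmx : x ∈ l.filter (fun c => pvCheb c == k) :=
          List.mem_filter.mpr ⟨hx, by simp [hc]⟩
        have := List.find?_eq_none.mp h0 x hmx
        simpa using this
      have hfix : l.filter q = (l.filter (fun c => decide (k < pvCheb c))).filter q := by
        apply pv_filter_absorb
        intro x hx hqx
        have hk := (hb x hx).1
        by_cases hck : pvCheb x = k
        · rw [hq0 x hx hck] at hqx; exact absurd hqx (by simp)
        · simp only [decide_eq_true_eq]; omega
      rw [hfix, ← pv_layered_filter n (k + 1) l (fun c => decide (k < pvCheb c))
        (fun x _ h => by simp; omega)]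
      apply ih (k + 1)
      intro x hx
      have hm := List.mem_of_mem_filter hx
      have hc : k < pvCheb x := by have := List.of_mem_filter hx; simpa using this
      have := hb x hm
      push_cast at this ⊢
      omega

-- closed-list identities
set_option maxRecDepth 200000 in
theorem pv_catSq_closed : (PySem.List.pyRange 1 12 1).flatMap pvSq = pvCatSq 1 11 := by decide

set_option maxRecDepth 200000 in
theorem pv_layered_window : pvLayered pvWindow 0 12 = (0, 0) :: pvCatRing 1 11 := by decide

set_option maxRecDepth 200000 in
theorem pv_window_bounds : ∀ x ∈ pvWindow, 0 ≤ pvCheb x ∧ pvCheb x < 0 + (12 : Nat) := by decide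

theorem pv_cond_eq (a b w h : Int) (m : Bool) :
    ((!(decide (a < 0) || decide (b < 0) || decide (w ≤ a) || decide (h ≤ b))) && m)
      = (decide (0 ≤ a) && decide (a < w) && decide (0 ≤ b) && decide (b < h) && m) := by
  by_cases h1 : a < 0 <;> by_cases h2 : b < 0 <;> by_cases h3 : w ≤ a <;> by_cases h4 : h ≤ b <;>
    simp_all

theorem pv_filterMap_if {α β : Type} (l : List α) (f : α → β) (p : β → Bool) :
    l.filterMap (fun x => if p (f x) then some (f x) else none) = (l.map f).filter p := by
  induction l with
  | nil => rfl
  | cons a t ih =>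
    by_cases hp : p (f a) <;> simp [hp, ih]

theorem pv_flatMap_filter {α β : Type} (l : List α) (g : α → List β) (p : β → Bool) :
    l.flatMap (fun x => (g x).filter p) = (l.flatMap g).filter p := by
  induction l with
  | nil => rfl
  | cons a t ih => simp [List.flatMap_cons, List.filter_append, ih]

-- The central lemma: once the seed itself is known not to be road, A's expanding-square
-- scan and B's gather-then-min return the same tile.
theorem pv_snap_eq (base_mask : List (Int × Int)) (grid_w grid_h sx sy : Int)
    (hm : base_mask.contains (sx, sy) = false) :
    pvSnapA base_mask grid_w grid_h sx sy = pvSnapB base_mask grid_w grid_h sx sy := by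
  set shift : Int × Int → Int × Int := fun c => (sx + c.1, sy + c.2) with hshift
  set q : Int × Int → Bool := fun c =>
    decide (0 ≤ sx + c.1) && decide (sx + c.1 < grid_w) && decide (0 ≤ sy + c.2)
      && decide (sy + c.2 < grid_h) && base_mask.contains (sx + c.1, sy + c.2) with hq
  -- A side
  have hA : pvSnapA base_mask grid_w grid_h sx sy = Option.map shift ((pvCatSq 1 11).find? q) := by
    rw [pvSnapA]
    have h1 : ∀ r : Int,
        (PySem.List.pyRange (-r) (r + 1) 1).flatMap (fun dy =>
          (PySem.List.pyRange (-r) (r + 1) 1).map (fun dx => (sx + dx, sy + dy)))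
        = (pvSq r).map shift := by
      intro r
      rw [pvSq, List.map_flatMap]
      congr 1
      funext dy
      rw [List.map_map]
      rfl
    simp only [h1]
    rw [← List.map_flatMap, pv_catSq_closed, List.find?_map]
    have hpq : ((fun n : Int × Int =>
        !(decide (n.1 < 0) || decide (n.2 < 0) || decide (grid_w ≤ n.1) || decide (grid_h ≤ n.2))
          && base_mask.contains n) ∘ shift) = q := by
      funext c
      show (!(decide (sx + c.1 < 0) || decide (sy + c.2 < 0) || decide (grid_w ≤ sx + c.1)
          || decide (grid_h ≤ sy + c.2)) && base_mask.contains (sx + c.1, sy + c.2)) = q c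
      rw [hq]
      exact pv_cond_eq (sx + c.1) (sy + c.2) grid_w grid_h _
    rw [hpq]
  -- B side
  have hB : pvSnapB base_mask grid_w grid_h sx sy
      = Option.map shift (PySem.List.min? (pvWindow.filter q) pvCheb) := by
    rw [pvSnapB]
    have h2 : ∀ dy : Int,
        (PySem.List.pyRange (-11) 12 1).filterMap (fun dx =>
          if decide (0 ≤ sx + dx) && decide (sx + dx < grid_w) && decide (0 ≤ sy + dy)
              && decide (sy + dy < grid_h) && base_mask.contains (sx + dx, sy + dy)
          then some (dx, dy) else none)
        = ((PySem.List.pyRange (-11) 12 1).map (fun dx => (dx, dy))).filter q := by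
      intro dy
      exact pv_filterMap_if (PySem.List.pyRange (-11) 12 1) (fun dx => (dx, dy)) q
    simp only [h2]
    rw [pv_flatMap_filter]
    show (match PySem.List.min? (pvWindow.filter q) pvCheb with
      | some c => some (sx + c.1, sy + c.2)
      | none => none) = _
    cases PySem.List.min? (pvWindow.filter q) pvCheb <;> rfl
  rw [hA, hB]
  congr 1
  have hq00 : q (0, 0) = false := by
    rw [hq]
    show (_ && base_mask.contains (sx + 0, sy + 0)) = false
    rw [show sx + 0 = sx by ring, show sy + 0 = sy by ring, hm, Bool.and_false]
  rw [pv_lemB 12 0 pvWindow q pv_window_bounds, pv_layered_window,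
    List.find?_cons_of_neg (by simp [hq00])]
  exact (pv_lemA 11 1 q (by
    intro c hc
    have h1 : |c.1| < 1 := lt_of_le_of_lt (le_max_left _ _) hc
    have h2 : |c.2| < 1 := lt_of_le_of_lt (le_max_right _ _) hc
    rw [abs_lt] at h1 h2
    have hc1 : c.1 = 0 := by omega
    have hc2 : c.2 = 0 := by omega
    have : c = (0, 0) := Prod.ext hc1 hc2
    rw [this, hq00]))

-- ===== VERDICT (by name: the statement is the Claim_ definition above) =====
theorem smart_seed_from_checkpoint_py_spec : Claim_equal_smart_seed_from_checkpoint_py := by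
  intro start_tiles base_mask grid_w grid_h end_center_tile _
  unfold Spec_smart_seed_from_checkpoint_py
  unfold smart_seed_from_checkpoint_py smart_seed_from_checkpoint_py_alt
  by_cases hst : start_tiles = []
  · simp [hst]
  · simp only [if_neg hst]
    set p := pvPrefix start_tiles base_mask grid_w grid_h end_center_tile
    by_cases hc : base_mask.contains (p.2.2.1, p.2.2.2) = true
    · rw [if_pos hc, if_pos hc]
    · rw [if_neg hc, if_neg hc]
      simp only [Bool.not_eq_true] at hc
      rw [pv_snap_eq base_mask grid_w grid_h p.2.2.1 p.2.2.2 hc]
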